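-- pv_equiv track=rewrite | github.com/vanschependom/KULAK_beginselen-van-programmeren | HC7/slides-les7-complexiteit-intuitief.py | loketRijenIteratiefCount
-- ===== SOURCE A (Python) =====
-- def loketRijenIteratiefCount(lengte, a='A', b='B'):
--     '''
--     Iteratieve variant dat enkel de toegelaten strings berekent
--     door telkens te tellen of er nog a's of b's mogen toegevoegd
--     worden.
--     Parameters
--     ----------
--     lengte : int
--     a : chr
--         Het character dat mensen voorstelt die met 5€ betalen.
--     b : chr
--         Het character dat mensen voorstelt die met 10€ betalen.
--     Returns
--     -------
--     [str]
--     '''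
--     result = [""]
--     for i in range(lengte):
--         oud = result
--         result = []
--         for rij in oud:
--             # 'A' mag altijd toegevoegd worden
--             result.append(rij+a)
--             # 'B' mag enkel toegevoegd worden indien
--             # er reeds meer 'A's dan 'B's voorkomen
--             if rij.count(a) > rij.count(b):
--                 result.append(rij+b)
--     return result
-- ===== SOURCE B (Python) =====
-- def loketRijenIteratiefCount(lengte, a='A', b='B'):
--     # DFS recursion on the remaining count instead of iterative level expansion.
--     def helper(n, rij):
--         if n <= 0:
--             return [rij]
--         res = helper(n - 1, rij + a)
--         if rij.count(a) > rij.count(b):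
--             res += helper(n - 1, rij + b)
--         return res
--     return helper(lengte, '')
-- ===== Notes on version B (the rewrite author's own statement) =====
-- stated objective: alternative
-- what changed: Replaces the iterative breadth-first level expansion (rebuilding the whole list of prefixes lengte times) by a depth-first recursion on the remaining count that concatenates the sublists of the two branches.
import Mathlib
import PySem

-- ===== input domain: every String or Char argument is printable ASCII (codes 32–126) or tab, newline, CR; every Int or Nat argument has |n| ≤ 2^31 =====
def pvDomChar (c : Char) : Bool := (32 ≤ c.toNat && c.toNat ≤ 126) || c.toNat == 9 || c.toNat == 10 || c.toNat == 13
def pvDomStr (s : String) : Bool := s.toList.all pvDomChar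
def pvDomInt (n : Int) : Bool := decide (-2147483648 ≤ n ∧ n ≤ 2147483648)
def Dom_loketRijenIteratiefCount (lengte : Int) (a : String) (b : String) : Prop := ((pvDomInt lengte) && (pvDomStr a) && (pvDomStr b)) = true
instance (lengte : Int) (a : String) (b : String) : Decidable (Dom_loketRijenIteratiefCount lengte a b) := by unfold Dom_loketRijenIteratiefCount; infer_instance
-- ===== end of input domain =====

-- B replaces A's iterative breadth-first level expansion by a depth-first recursion on the
-- remaining count (alternative decomposition, same output order and values).

-- ===== PORT A =====
def loketRijenIteratiefCount (lengte : Int) (a : String) (b : String) : List String :=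
  (PySem.List.pyRange 0 lengte 1).foldl
    (fun result _i =>
      result.foldl (fun res rij =>
        let res := res ++ [rij ++ a]
        if PySem.Str.count rij a > PySem.Str.count rij b then res ++ [rij ++ b] else res)
        [])
    [""]

-- ===== PORT B =====
def pvHelperAlt (a : String) (b : String) (n : Int) (rij : String) : List String :=
  if _h : n ≤ 0 then [rij]
  else
    let res := pvHelperAlt a b (n - 1) (rij ++ a)
    if PySem.Str.count rij a > PySem.Str.count rij b then res ++ pvHelperAlt a b (n - 1) (rij ++ b)
    else res
termination_by n.toNat
decreasing_by all_goals omega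

def loketRijenIteratiefCount_alt (lengte : Int) (a : String) (b : String) : List String :=
  pvHelperAlt a b lengte ""

-- ===== PRECONDITION & SPEC =====
def Spec_loketRijenIteratiefCount (lengte : Int) (a : String) (b : String) (out : List String) : Prop := out = loketRijenIteratiefCount_alt lengte a b
instance (lengte : Int) (a : String) (b : String) (out : List String) : Decidable (Spec_loketRijenIteratiefCount lengte a b out) := by unfold Spec_loketRijenIteratiefCount; infer_instance

-- ===== CLAIM (what is proved, stated in full; the proofs are below) =====
def Claim_equal_loketRijenIteratiefCount : Prop := ∀ (lengte : Int) (a : String) (b : String), Dom_loketRijenIteratiefCount lengte a b → Spec_loketRijenIteratiefCount lengte a b (loketRijenIteratiefCount lengte a b)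

-- ===== LEMMAS AND PROOFS =====

-- one expansion step: strings that may follow rij
def pvStep (a b rij : String) : List String :=
  (rij ++ a) :: (if PySem.Str.count rij a > PySem.Str.count rij b then [rij ++ b] else [])

-- n-fold breadth-first expansion
def pvIter (a b : String) : Nat → List String → List String
  | 0, L => L
  | n + 1, L => pvIter a b n (L.flatMap (pvStep a b))

theorem pvIter_append (a b : String) (n : Nat) (L1 L2 : List String) :
    pvIter a b n (L1 ++ L2) = pvIter a b n L1 ++ pvIter a b n L2 := by
  induction n generalizing L1 L2 with
  | zero => rfl
  | succ n ih => simp [pvIter, List.flatMap_append, ih]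

theorem pvInner_eq (a b : String) (L : List String) (acc : List String) :
    L.foldl (fun res rij =>
      let res := res ++ [rij ++ a]
      if PySem.Str.count rij a > PySem.Str.count rij b then res ++ [rij ++ b] else res) acc
      = acc ++ L.flatMap (pvStep a b) := by
  induction L generalizing acc with
  | nil => simp
  | cons x xs ih =>
      simp only [List.foldl_cons, List.flatMap_cons, ih, pvStep]
      split <;> simp

theorem pvA_eq_iter (a b : String) (lo hi : Int) (L : List String) :
    (PySem.List.pyRange lo hi 1).foldl
      (fun result _i =>
        result.foldl (fun res rij =>
          let res := res ++ [rij ++ a]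
          if PySem.Str.count rij a > PySem.Str.count rij b then res ++ [rij ++ b] else res)
          []) L
      = pvIter a b (hi - lo).toNat L := by
  by_cases h : hi ≤ lo
  · rw [PySem.List.pyRange_one_eq_nil h]
    have : (hi - lo).toNat = 0 := by omega
    simp [this, pvIter]
  · push Not at h
    rw [PySem.List.pyRange_one_cons h]
    have hn : (hi - lo).toNat = (hi - (lo + 1)).toNat + 1 := by omega
    rw [hn]
    simp only [List.foldl_cons, pvIter]
    rw [pvA_eq_iter a b (lo + 1) hi, pvInner_eq]
    simp
termination_by (hi - lo).toNat
decreasing_by omega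

theorem pvB_eq_iter (a b : String) (n : Nat) (rij : String) :
    pvHelperAlt a b (n : Int) rij = pvIter a b n [rij] := by
  induction n generalizing rij with
  | zero => rw [pvHelperAlt]; simp [pvIter]
  | succ n ih =>
      rw [pvHelperAlt]
      have h0 : ¬ ((n + 1 : Nat) : Int) ≤ 0 := by omega
      have h1 : ((n + 1 : Nat) : Int) - 1 = (n : Int) := by omega
      simp only [h0, dif_neg, not_false_iff, h1, ih]
      simp only [pvIter, List.flatMap_cons, List.flatMap_nil, List.append_nil, pvStep]
      split
      · rw [show (rij ++ a) :: [rij ++ b] = [rij ++ a] ++ [rij ++ b] from rfl, pvIter_append]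
      · rfl

-- ===== VERDICT (by name: the statement is the Claim_ definition above) =====
theorem loketRijenIteratiefCount_spec : Claim_equal_loketRijenIteratiefCount := by
  intro lengte a b _hdom
  unfold Spec_loketRijenIteratiefCount loketRijenIteratiefCount loketRijenIteratiefCount_alt
  rw [pvA_eq_iter]
  by_cases h : lengte ≤ 0
  · have : (lengte - 0).toNat = 0 := by omega
    rw [this, pvHelperAlt]
    simp [h, pvIter]
  · have hl : ((lengte.toNat : Nat) : Int) = lengte := by omega
    have : (lengte - 0).toNat = lengte.toNat := by omega
    rw [this, ← hl, pvB_eq_iter]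
    congr 1
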